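-- pv_equiv track=rewrite | github.com/gurjotsc/gcheema-cp | leetcode/easy/numberOfRectanglesThatCanFormTheLargestSquare.py | countGoodRectangles
-- ===== SOURCE A (Python) =====
-- from typing import List
--
-- def countGoodRectangles(rectangles: List[List[int]]) -> int:
--     m = 0 #max
--     res = 0
--     ##look through the list
--     for i in rectangles:
--         #when you find a new max length update the length and restart your res
--         if (m is not max(m, min(i))):
--             res = 1
--             m = min(i)
--         #if its not a new max length, then if the min length of rectangle i is the same as                maxlengh then you can increment your res
--         else:
--             if (min(i) == m): res += 1
--     return res
-- ===== SOURCE B (Python) =====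
-- from typing import List
--
-- def countGoodRectangles(rectangles: List[List[int]]) -> int:
--     # build-then-reduce: list of min sides, take the max (seeded with 0 like A's
--     # running max), count how often it occurs
--     mins = [min(r) for r in rectangles]
--     best = max(mins + [0])
--     return mins.count(best)
-- ===== Notes on version B (the rewrite author's own statement) =====
-- stated objective: simpler
-- what changed: A's single fused pass with an identity-compared running max and a counter that resets is replaced by a build-then-reduce pipeline: map each rectangle to its min side, take the max of that list (seeded with 0 as A's running max is), and count its occurrences.
import Mathlib
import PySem

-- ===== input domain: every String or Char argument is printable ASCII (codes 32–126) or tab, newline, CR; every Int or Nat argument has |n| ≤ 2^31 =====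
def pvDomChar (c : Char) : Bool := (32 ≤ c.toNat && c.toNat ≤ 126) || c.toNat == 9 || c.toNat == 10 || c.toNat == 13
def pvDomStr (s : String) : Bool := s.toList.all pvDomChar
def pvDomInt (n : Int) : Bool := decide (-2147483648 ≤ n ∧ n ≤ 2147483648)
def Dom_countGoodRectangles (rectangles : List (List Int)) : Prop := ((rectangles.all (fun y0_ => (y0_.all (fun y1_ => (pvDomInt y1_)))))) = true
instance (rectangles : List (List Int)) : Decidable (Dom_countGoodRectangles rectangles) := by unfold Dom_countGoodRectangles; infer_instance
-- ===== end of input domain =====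

-- ===== PORT A =====
-- B changes A's fused running-max-with-reset pass into a map/max/count pipeline (objective: simpler).
-- Python's `min(i)` inside the loop (min of a list, no key) is PySem.List.min? with identity key,
-- defaulted (Pre_ excludes inputs containing an empty inner list, where it raises ValueError).
-- `m is not max(m, min(i))`: CPython's max returns one of its argument objects, so the identity
-- test holds exactly when min(i) > m, i.e. m ≠ max m (min i); ported as that value inequality.
def countGoodRectangles (rectangles : List (List Int)) : Int :=
  (rectangles.foldl (fun (st : Int × Int) i =>
      let mi := (PySem.List.min? i (fun x => x)).getD 0
      if st.1 ≠ max st.1 mi then (mi, 1)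
      else if mi = st.1 then (st.1, st.2 + 1) else st)
    (0, 0)).2

-- ===== PORT B =====
def countGoodRectangles_alt (rectangles : List (List Int)) : Int :=
  let mins := rectangles.map (fun r => (PySem.List.min? r (fun x => x)).getD 0)
  let best := (PySem.List.max? (mins ++ [0]) (fun x => x)).getD 0
  PySem.List.count mins best

-- ===== PRECONDITION & SPEC =====
-- Pre_ excludes inputs containing an empty inner list, on which Python's min of it raises ValueError.
def Pre_countGoodRectangles (rectangles : List (List Int)) : Prop :=
  ∀ r ∈ rectangles, r ≠ []
instance (rectangles : List (List Int)) : Decidable (Pre_countGoodRectangles rectangles) := by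
  unfold Pre_countGoodRectangles; infer_instance
def pvWitness_countGoodRectangles : List (List Int) := [[5, 8], [3, 9, 5], [5, 12], [16, 5]]
def Spec_countGoodRectangles (rectangles : List (List Int)) (out : Int) : Prop := out = countGoodRectangles_alt rectangles
instance (rectangles : List (List Int)) (out : Int) : Decidable (Spec_countGoodRectangles rectangles out) := by unfold Spec_countGoodRectangles; infer_instance

-- ===== CLAIM (what is proved, stated in full; the proofs are below) =====
def Claim_equal_countGoodRectangles : Prop := ∀ (rectangles : List (List Int)), Dom_countGoodRectangles rectangles → Pre_countGoodRectangles rectangles → Spec_countGoodRectangles rectangles (countGoodRectangles rectangles)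

-- ===== LEMMAS AND PROOFS =====

-- A's loop step, abstracted over the already-computed min side.
def pvStepA (st : Int × Int) (mi : Int) : Int × Int :=
  if st.1 ≠ max st.1 mi then (mi, 1)
  else if mi = st.1 then (st.1, st.2 + 1) else st

lemma pvStepA_loop (p : List Int) : ∀ (M C : Int),
    p.foldl pvStepA (M, C) =
      (p.foldl max M, (p.count (p.foldl max M) : Int) + if p.foldl max M = M then C else 0) := by
  induction p with
  | nil => intro M C; simp
  | cons mi rest ih =>
    intro M C
    simp only [List.foldl_cons, List.count_cons]
    rcases lt_trichotomy M mi with h | h | h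
    · have hstep : pvStepA (M, C) mi = (mi, 1) := by
        simp [pvStepA, max_eq_right h.le, h.ne]
      rw [hstep, ih]
      simp only [max_eq_right h.le]
      have hM : M < rest.foldl max mi := lt_of_lt_of_le h (PySem.List.le_foldl_max _ _).1
      have : rest.foldl max mi ≠ M := by omega
      by_cases he : rest.foldl max mi = mi <;> simp [he, this] <;> omega
    · subst h
      have hstep : pvStepA (M, C) M = (M, C + 1) := by simp [pvStepA]
      rw [hstep, ih]
      simp only [max_self]
      by_cases he : rest.foldl max M = M <;> simp [he] <;> omega
    · have hstep : pvStepA (M, C) mi = (M, C) := by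
        simp [pvStepA, max_eq_left h.le, h.ne]
      rw [hstep, ih]
      simp only [max_eq_left h.le]
      have hM : mi < rest.foldl max M := lt_of_lt_of_le h (PySem.List.le_foldl_max _ _).1
      have h2 : rest.foldl max M ≠ mi := by omega
      simp [Ne.symm h2]

-- max over (mins ++ [0]) as a left fold, rearranged to a fold seeded with 0.
lemma pvFoldlMaxSwap (l : List Int) : ∀ (a b : Int),
    l.foldl max (max a b) = max (l.foldl max a) b := by
  induction l with
  | nil => intro a b; simp
  | cons y r ih =>
    intro a b
    simp only [List.foldl_cons]
    rw [show max (max a b) y = max (max a y) b by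
          rcases le_total a b with h | h <;> rcases le_total a y with h2 | h2 <;>
            rcases le_total b y with h3 | h3 <;>
            simp [*] <;> omega,
        ih]

lemma pvMaxSeed (mins : List Int) :
    (PySem.List.max? (mins ++ [0]) (fun x => x)).getD 0 = mins.foldl max 0 := by
  cases mins with
  | nil => simp [PySem.List.max?_id_cons]
  | cons x t =>
    rw [List.cons_append, PySem.List.max?_id_cons, Option.getD_some, List.foldl_append]
    simp only [List.foldl_cons, List.foldl_nil]
    rw [max_comm (0 : Int) x]
    exact (pvFoldlMaxSwap t x 0).symm

-- ===== VERDICT (by name: the statement is the Claim_ definition above) =====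
lemma pvFoldMinMap (l : List (List Int)) (s : Int × Int) :
    l.foldl (fun st i => pvStepA st ((PySem.List.min? i (fun x => x)).getD 0)) s
      = (l.map (fun r => (PySem.List.min? r (fun x => x)).getD 0)).foldl pvStepA s := by
  induction l generalizing s with
  | nil => rfl
  | cons r t ih => simp only [List.foldl_cons, List.map_cons, ih]

theorem countGoodRectangles_spec : Claim_equal_countGoodRectangles := by
  intro rectangles _ _
  unfold Spec_countGoodRectangles countGoodRectangles countGoodRectangles_alt
  refine Eq.trans (congrArg Prod.snd (pvFoldMinMap rectangles ((0:Int), (0:Int)))) ?_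
  simp only [pvStepA_loop, pvMaxSeed, PySem.List.count]
  simp
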